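-- pv_equiv track=rewrite | github.com/LiliaFramework/Lilia | fix_lua_indentation.py | analyze_lua_indentation
-- ===== SOURCE A (Python) =====
-- def analyze_lua_indentation(content_lines, base_indent):
--     """
--     Analyze Lua code and apply proper multi-level indentation.
--
--     Args:
--         content_lines (list): Lines of Lua code
--         base_indent (int): Base indentation where ```lua starts
--
--     Returns:
--         list: Properly indented code lines
--     """
--     result_lines = []
--     indent_level = 0  # 0 = top-level, 1 = inside block, 2 = nested block, etc.
--
--     i = 0
--     while i < len(content_lines):
--         line = content_lines[i]
--         stripped = line.strip()
--
--         # Skip empty lines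
--         if not stripped:
--             result_lines.append("")
--             i += 1
--             continue
--
--         # Comments - keep them at their logical level
--         if stripped.startswith('--'):
--             current_indent = base_indent + (indent_level * 4)
--             result_lines.append(' ' * current_indent + stripped)
--             i += 1
--             continue
--
--         # Calculate proper indentation for this line
--         proper_indent = base_indent + (indent_level * 4)
--
--         # Analyze what type of line this is to determine if it changes indent level
--
--         # Function definitions - increase indent for next line (function body)
--         if stripped.startswith(('function', 'local function')):
--             result_lines.append(' ' * proper_indent + stripped)
--             indent_level += 1  # Next line will be indented more
--
--         # Control structures - increase indent for body
--         elif stripped.startswith(('if ', 'elseif ', 'else')):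
--             result_lines.append(' ' * proper_indent + stripped)
--             if 'then' in stripped or stripped.startswith('else'):
--                 indent_level += 1
--
--         # Loops - increase indent for body
--         elif stripped.startswith(('for ', 'while ', 'repeat')):
--             result_lines.append(' ' * proper_indent + stripped)
--             if 'do' in stripped or stripped.startswith('repeat'):
--                 indent_level += 1
--
--         # Standalone do blocks
--         elif stripped == 'do':
--             result_lines.append(' ' * proper_indent + stripped)
--             indent_level += 1
--
--         # Block enders - decrease indent level
--         elif stripped.startswith(('end', 'until')):
--             # End statements go back one level
--             if indent_level > 0:
--                 indent_level -= 1
--             result_lines.append(' ' * (base_indent + (indent_level * 4)) + stripped)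
--
--         # Regular statements (assignments, function calls, etc.)
--         else:
--             result_lines.append(' ' * proper_indent + stripped)
--
--         i += 1
--
--     return result_lines
-- ===== SOURCE B (Python) =====
-- def _delta(s):
--     """(dedent_before, indent_after) of a stripped line; (0,0) for blank/comment lines."""
--     if not s or s.startswith('--'):
--         return (0, 0)
--     if s.startswith(('function', 'local function')):
--         return (0, 1)
--     if s.startswith(('if ', 'elseif ', 'else')):
--         return (0, 1 if 'then' in s or s.startswith('else') else 0)
--     if s.startswith(('for ', 'while ', 'repeat')):
--         return (0, 1 if 'do' in s or s.startswith('repeat') else 0)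
--     if s == 'do':
--         return (0, 1)
--     if s.startswith(('end', 'until')):
--         return (1, 0)
--     return (0, 0)
--
--
-- def analyze_lua_indentation(content_lines, base_indent):
--     # Pass 1: strip every line.
--     strips = [line.strip() for line in content_lines]
--     # Pass 2: classify each line into indentation deltas.
--     deltas = [_delta(s) for s in strips]
--     # Pass 3: clamped prefix scan turning deltas into per-line emit levels.
--     levels = []
--     lvl = 0
--     for pre, post in deltas:
--         emit = max(lvl - pre, 0)
--         levels.append(emit)
--         lvl = emit + post
--     # Pass 4: render.
--     return ["" if not s else ' ' * (base_indent + e * 4) + s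
--             for s, e in zip(strips, levels)]
-- ===== Notes on version B (the rewrite author's own statement) =====
-- stated objective: alternative
-- what changed: A's single stateful while-loop with per-branch emit/update logic is replaced by a staged pipeline: strip all lines, classify each into (dedent_before, indent_after) deltas, run a clamped prefix scan turning deltas into per-line emit levels, then render all lines in a final pass.
import Mathlib
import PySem

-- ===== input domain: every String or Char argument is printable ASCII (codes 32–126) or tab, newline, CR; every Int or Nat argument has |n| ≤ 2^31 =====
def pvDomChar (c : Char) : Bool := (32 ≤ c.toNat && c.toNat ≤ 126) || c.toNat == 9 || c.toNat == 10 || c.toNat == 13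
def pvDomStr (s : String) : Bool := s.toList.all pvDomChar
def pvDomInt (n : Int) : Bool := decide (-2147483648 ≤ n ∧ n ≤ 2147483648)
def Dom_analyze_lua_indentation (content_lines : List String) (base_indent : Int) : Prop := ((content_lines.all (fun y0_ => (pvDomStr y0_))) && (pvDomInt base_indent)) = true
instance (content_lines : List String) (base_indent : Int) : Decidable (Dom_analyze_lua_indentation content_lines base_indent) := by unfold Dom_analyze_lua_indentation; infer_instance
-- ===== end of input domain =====

-- B replaces A's single stateful loop by a staged pipeline (strip pass, delta classification,
-- clamped prefix scan of levels, render pass); same output, simpler decomposition (no speed claim).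

-- ' ' * n ++ cs   (Python's ' ' * n is '' for n ≤ 0, which Int.toNat matches)
def pvEmit (n : Int) (cs : List Char) : String := String.ofList (List.replicate n.toNat ' ' ++ cs)

-- ===== PORT A =====
def pvALoop (base : Int) : List String → Int → List String
  | [], _ => []
  | line :: rest, level =>
    let cs := (PySem.Str.strip line).toList
    if cs.isEmpty then
      "" :: pvALoop base rest level
    else if PySem.Chars.startswith cs "--".toList then
      pvEmit (base + level * 4) cs :: pvALoop base rest level
    else if PySem.Chars.startswith cs "function".toList || PySem.Chars.startswith cs "local function".toList then
      pvEmit (base + level * 4) cs :: pvALoop base rest (level + 1)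
    else if PySem.Chars.startswith cs "if ".toList || PySem.Chars.startswith cs "elseif ".toList || PySem.Chars.startswith cs "else".toList then
      pvEmit (base + level * 4) cs ::
        pvALoop base rest
          (if PySem.Chars.isIn "then".toList cs || PySem.Chars.startswith cs "else".toList then level + 1 else level)
    else if PySem.Chars.startswith cs "for ".toList || PySem.Chars.startswith cs "while ".toList || PySem.Chars.startswith cs "repeat".toList then
      pvEmit (base + level * 4) cs ::
        pvALoop base rest
          (if PySem.Chars.isIn "do".toList cs || PySem.Chars.startswith cs "repeat".toList then level + 1 else level)
    else if cs = "do".toList then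
      pvEmit (base + level * 4) cs :: pvALoop base rest (level + 1)
    else if PySem.Chars.startswith cs "end".toList || PySem.Chars.startswith cs "until".toList then
      let level' := if level > 0 then level - 1 else level
      pvEmit (base + level' * 4) cs :: pvALoop base rest level'
    else
      pvEmit (base + level * 4) cs :: pvALoop base rest level

def analyze_lua_indentation (content_lines : List String) (base_indent : Int) : List String :=
  pvALoop base_indent content_lines 0

-- ===== PORT B =====
-- pass 2 classifier: stripped line ↦ (dedent_before, indent_after); (0,0) for blank/comment lines
def pvDelta (cs : List Char) : Int × Int :=
  if cs.isEmpty || PySem.Chars.startswith cs "--".toList then (0, 0)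
  else if PySem.Chars.startswith cs "function".toList || PySem.Chars.startswith cs "local function".toList then (0, 1)
  else if PySem.Chars.startswith cs "if ".toList || PySem.Chars.startswith cs "elseif ".toList || PySem.Chars.startswith cs "else".toList then
    (0, if PySem.Chars.isIn "then".toList cs || PySem.Chars.startswith cs "else".toList then 1 else 0)
  else if PySem.Chars.startswith cs "for ".toList || PySem.Chars.startswith cs "while ".toList || PySem.Chars.startswith cs "repeat".toList then
    (0, if PySem.Chars.isIn "do".toList cs || PySem.Chars.startswith cs "repeat".toList then 1 else 0)
  else if cs = "do".toList then (0, 1)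
  else if PySem.Chars.startswith cs "end".toList || PySem.Chars.startswith cs "until".toList then (1, 0)
  else (0, 0)

-- pass 3: clamped prefix scan turning deltas into per-line emit levels
def pvLevels : List (Int × Int) → Int → List Int
  | [], _ => []
  | d :: rest, lvl =>
    let emit := max (lvl - d.1) 0
    emit :: pvLevels rest (emit + d.2)

-- pass 4: render
def pvRender (base : Int) (ps : List (List Char × Int)) : List String :=
  ps.map (fun p => if p.1.isEmpty then "" else pvEmit (base + p.2 * 4) p.1)

def analyze_lua_indentation_alt (content_lines : List String) (base_indent : Int) : List String :=
  let strips := content_lines.map (fun l => (PySem.Str.strip l).toList)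
  pvRender base_indent (strips.zip (pvLevels (strips.map pvDelta) 0))

-- ===== PRECONDITION & SPEC =====
def Spec_analyze_lua_indentation (content_lines : List String) (base_indent : Int) (out : List String) : Prop := out = analyze_lua_indentation_alt content_lines base_indent
instance (content_lines : List String) (base_indent : Int) (out : List String) : Decidable (Spec_analyze_lua_indentation content_lines base_indent out) := by unfold Spec_analyze_lua_indentation; infer_instance

-- ===== CLAIM (what is proved, stated in full; the proofs are below) =====
def Claim_equal_analyze_lua_indentation : Prop := ∀ (content_lines : List String) (base_indent : Int), Dom_analyze_lua_indentation content_lines base_indent → Spec_analyze_lua_indentation content_lines base_indent (analyze_lua_indentation content_lines base_indent)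

-- ===== LEMMAS AND PROOFS =====
lemma pvStep (base pre post lvl : Int) (cs : List Char) (strips : List (List Char))
    (ds : List (Int × Int)) :
    pvRender base ((cs :: strips).zip (pvLevels ((pre, post) :: ds) lvl)) =
      (if cs.isEmpty then "" else pvEmit (base + (max (lvl - pre) 0) * 4) cs)
        :: pvRender base (strips.zip (pvLevels ds (max (lvl - pre) 0 + post))) := by
  simp [pvRender, pvLevels]

set_option maxHeartbeats 1000000 in
lemma pvLoop_eq (base : Int) (lines : List String) (level : Int) (hlv : 0 ≤ level) :
    pvALoop base lines level =
      pvRender base ((lines.map (fun l => (PySem.Str.strip l).toList)).zip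
        (pvLevels ((lines.map (fun l => (PySem.Str.strip l).toList)).map pvDelta) level)) := by
  induction lines generalizing level with
  | nil => simp [pvALoop, pvRender]
  | cons line rest ih =>
    simp only [pvALoop, List.map_cons]
    generalize (PySem.Str.strip line).toList = cs
    split_ifs with h1 h2 h3 h4 h5 h6 h7 h8 h9 h10
    · -- blank line
      have hd : pvDelta cs = (0, 0) := by
        unfold pvDelta
        split_ifs <;> first | rfl | (simp only [Bool.or_eq_true] at *; tauto)
      rw [hd, pvStep, if_pos h1]
      rw [show max (level - (0:Int)) 0 = level from by omega,
          show level + (0:Int) = level from by omega]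
      exact congrArg _ (ih level hlv)
    · -- comment
      have hd : pvDelta cs = (0, 0) := by
        unfold pvDelta
        split_ifs <;> first | rfl | (simp only [Bool.or_eq_true] at *; tauto)
      rw [hd, pvStep, if_neg h1]
      rw [show max (level - (0:Int)) 0 = level from by omega,
          show level + (0:Int) = level from by omega]
      exact congrArg _ (ih level hlv)
    · -- function / local function
      have hd : pvDelta cs = (0, 1) := by
        unfold pvDelta
        split_ifs <;> first | rfl | (simp only [Bool.or_eq_true] at *; tauto)
      rw [hd, pvStep, if_neg h1]
      rw [show max (level - (0:Int)) 0 = level from by omega]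
      exact congrArg _ (ih (level + 1) (by omega))
    · -- if/elseif/else, opener
      have hd : pvDelta cs = (0, 1) := by
        unfold pvDelta
        split_ifs <;> first | rfl | (simp only [Bool.or_eq_true] at *; tauto)
      rw [hd, pvStep, if_neg h1]
      rw [show max (level - (0:Int)) 0 = level from by omega]
      exact congrArg _ (ih (level + 1) (by omega))
    · -- if/elseif/else, no opener
      have hd : pvDelta cs = (0, 0) := by
        unfold pvDelta
        split_ifs <;> first | rfl | (simp only [Bool.or_eq_true] at *; tauto)
      rw [hd, pvStep, if_neg h1]
      rw [show max (level - (0:Int)) 0 = level from by omega,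
          show level + (0:Int) = level from by omega]
      exact congrArg _ (ih level hlv)
    · -- for/while/repeat, opener
      have hd : pvDelta cs = (0, 1) := by
        unfold pvDelta
        split_ifs <;> first | rfl | (simp only [Bool.or_eq_true] at *; tauto)
      rw [hd, pvStep, if_neg h1]
      rw [show max (level - (0:Int)) 0 = level from by omega]
      exact congrArg _ (ih (level + 1) (by omega))
    · -- for/while/repeat, no opener
      have hd : pvDelta cs = (0, 0) := by
        unfold pvDelta
        split_ifs <;> first | rfl | (simp only [Bool.or_eq_true] at *; tauto)
      rw [hd, pvStep, if_neg h1]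
      rw [show max (level - (0:Int)) 0 = level from by omega,
          show level + (0:Int) = level from by omega]
      exact congrArg _ (ih level hlv)
    · -- standalone do
      have hd : pvDelta cs = (0, 1) := by
        unfold pvDelta
        split_ifs <;> first | rfl | (simp only [Bool.or_eq_true] at *; tauto)
      rw [hd, pvStep, if_neg h1]
      rw [show max (level - (0:Int)) 0 = level from by omega]
      exact congrArg _ (ih (level + 1) (by omega))
    · -- end / until, level > 0
      have hd : pvDelta cs = (1, 0) := by
        unfold pvDelta
        split_ifs <;> first | rfl | (simp only [Bool.or_eq_true] at *; tauto)
      rw [hd, pvStep, if_neg h1]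
      rw [show max (level - (1:Int)) 0 = level - 1 from by omega,
          show level - (1:Int) + 0 = level - 1 from by omega]
      exact congrArg _ (ih (level - 1) (by omega))
    · -- end / until, level = 0
      have hd : pvDelta cs = (1, 0) := by
        unfold pvDelta
        split_ifs <;> first | rfl | (simp only [Bool.or_eq_true] at *; tauto)
      rw [hd, pvStep, if_neg h1]
      rw [show max (level - (1:Int)) 0 = level from by omega,
          show level + (0:Int) = level from by omega]
      exact congrArg _ (ih level hlv)
    · -- plain statement
      have hd : pvDelta cs = (0, 0) := by
        unfold pvDelta
        split_ifs <;> first | rfl | (simp only [Bool.or_eq_true] at *; tauto)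
      rw [hd, pvStep, if_neg h1]
      rw [show max (level - (0:Int)) 0 = level from by omega,
          show level + (0:Int) = level from by omega]
      exact congrArg _ (ih level hlv)

-- ===== VERDICT (by name: the statement is the Claim_ definition above) =====
theorem analyze_lua_indentation_spec : Claim_equal_analyze_lua_indentation := by
  intro lines base _
  unfold Spec_analyze_lua_indentation analyze_lua_indentation analyze_lua_indentation_alt
  exact pvLoop_eq base lines 0 le_rfl
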